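-- pv_equiv track=rewrite | github.com/smsxgz/euler_project | Pandigital_prime_sets.py | Pandigital_prime_sets1
-- ===== SOURCE A (Python) =====
-- dig_set = set('123456789')
--
-- def is_unique(m, num_set):
--     s = str(m)
--     if len(s) > len(set(s) | num_set) - len(num_set):
--         return False
--     else:
--         return True
--
-- def Pandigital_prime_sets1(prime, num_set = set()):
--     if num_set == dig_set:
--         return 1
--     if prime == []:
--         return 0
--
--     l = 0
--     for i, p in enumerate(prime):
--         if is_unique(p, num_set):
--             num = Pandigital_prime_sets1(prime[i + 1:], num_set | set(str(p)))
--             l += num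
--
--     return l
-- ===== SOURCE B (Python) =====
-- dig_set = set('123456789')
--
-- def Pandigital_prime_sets1(prime, num_set=set()):
--     # Bitmask DP over the nine digit bits: each prime is processed once.
--     start = 0
--     for c in num_set:
--         if c in dig_set:
--             start |= 1 << (int(c) - 1)
--         else:
--             return 0  # a non-digit member can never be removed, so dig_set is unreachable
--     dp = [0] * 512
--     dp[start] = 1
--     for p in prime:
--         s = str(p)
--         if len(set(s)) < len(s) or not set(s) <= dig_set:
--             continue  # repeated or non-1-9 digits: choosing p can never lead to dig_set
--         m = 0
--         for c in s:
--             m |= 1 << (int(c) - 1)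
--         dp = [dp[k] + (dp[k ^ m] if k & m == m else 0) for k in range(512)]
--     return dp[511]
-- ===== Notes on version B (the rewrite author's own statement) =====
-- stated objective: faster
-- what changed: A's exponential recursion over index-increasing prime subsets (re-testing digit-set disjointness with Python set unions at every node) is replaced by a bitmask dynamic program over the nine digit bits: each prime is converted to a 9-bit mask once and folded through a 512-entry table, so the answer is read off at the full mask.
import Mathlib
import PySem

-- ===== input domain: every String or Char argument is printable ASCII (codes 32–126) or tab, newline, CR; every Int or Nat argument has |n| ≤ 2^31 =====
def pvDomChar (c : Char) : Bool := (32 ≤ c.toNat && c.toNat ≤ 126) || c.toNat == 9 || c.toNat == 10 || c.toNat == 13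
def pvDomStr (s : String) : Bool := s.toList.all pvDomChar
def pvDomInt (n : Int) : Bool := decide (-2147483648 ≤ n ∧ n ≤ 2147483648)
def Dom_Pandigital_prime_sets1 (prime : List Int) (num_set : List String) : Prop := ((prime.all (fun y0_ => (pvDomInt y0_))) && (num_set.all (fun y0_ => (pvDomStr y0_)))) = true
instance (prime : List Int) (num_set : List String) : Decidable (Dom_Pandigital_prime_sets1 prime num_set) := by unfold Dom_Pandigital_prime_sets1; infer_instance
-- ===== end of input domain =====

-- B replaces A's exponential recursion over index-increasing subsets by a bitmask DP over
-- the nine digit bits (each prime processed once); objective: faster.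

-- ===== PORT A =====
-- dig_set = set('123456789')
def pvDigSet : PySem.Set String := PySem.Set.ofList (("123456789".toList).map String.singleton)

-- is_unique(m, num_set)
def pvIsUnique (m : Int) (num_set : PySem.Set String) : Bool :=
  let s := PySem.Int.toChars m
  if (s.length : Int) > ((PySem.Set.len (PySem.Set.union (PySem.Set.ofList (s.map String.singleton)) num_set)) : Int) - ((PySem.Set.len num_set) : Int)
  then false else true

-- the recursion of A; fuel only makes the recursion structural (never exhausted when
-- fuel > prime.length, which every call maintains)
def pvPandA (fuel : Nat) (prime : List Int) (ns : PySem.Set String) : Int :=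
  match fuel with
  | 0 => 0
  | fuel + 1 =>
    if PySem.Set.equal ns pvDigSet then 1
    else if prime = [] then 0
    else
      (PySem.List.enumerate prime).foldl
        (fun l ip =>
          if pvIsUnique ip.2 ns then
            l + pvPandA fuel (PySem.List.slice prime (some (ip.1 + 1)))
                  (PySem.Set.union ns (PySem.Set.ofList ((PySem.Int.toChars ip.2).map String.singleton)))
          else l) 0

def Pandigital_prime_sets1 (prime : List Int) (num_set : List String) : Int :=
  pvPandA (prime.length + 1) prime (PySem.Set.ofList num_set)

-- ===== PORT B =====
-- int(c) - 1 ; exact on its only uses, where c is one of "1".."9"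
def pvBit (c : String) : Nat := (((PySem.Int.ofStr? c).getD 0) - 1).toNat

-- the 'for c in num_set' loop of B: none = the early 'return 0'
def pvStart : List String → Nat → Option Nat
  | [], acc => some acc
  | c :: rest, acc =>
    if PySem.Set.contains pvDigSet c then pvStart rest (acc ||| (1 <<< pvBit c)) else none

-- one DP transition of B (the list comprehension); dp has 512 entries, indices in range
def pvStep (dp : List Int) (m : Nat) : List Int :=
  (List.range 512).map (fun k => dp[k]! + (if k &&& m == m then dp[k ^^^ m]! else 0))

def Pandigital_prime_sets1_alt (prime : List Int) (num_set : List String) : Int :=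
  match pvStart num_set 0 with
  | none => 0
  | some start =>
    let dp0 : List Int := (List.replicate 512 (0 : Int)).set start 1
    let dp := prime.foldl (fun dp p =>
        let s := PySem.Int.toChars p
        let strs := s.map String.singleton
        if PySem.Set.len (PySem.Set.ofList strs) < strs.length
           || !PySem.Set.issubset (PySem.Set.ofList strs) pvDigSet then dp
        else pvStep dp (s.foldl (fun m c => m ||| (1 <<< pvBit (String.singleton c))) 0)) dp0
    dp[511]!

-- ===== PRECONDITION & SPEC =====
def Spec_Pandigital_prime_sets1 (prime : List Int) (num_set : List String) (out : Int) : Prop := out = Pandigital_prime_sets1_alt prime num_set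
instance (prime : List Int) (num_set : List String) (out : Int) : Decidable (Spec_Pandigital_prime_sets1 prime num_set out) := by unfold Spec_Pandigital_prime_sets1; infer_instance

-- ===== CLAIM (what is proved, stated in full; the proofs are below) =====
def Claim_equal_Pandigital_prime_sets1 : Prop := ∀ (prime : List Int) (num_set : List String), Dom_Pandigital_prime_sets1 prime num_set → Spec_Pandigital_prime_sets1 prime num_set (Pandigital_prime_sets1 prime num_set)

-- ===== LEMMAS AND PROOFS =====

-- digits as chars and as one-char strings
def pdDS : List Char := ['1','2','3','4','5','6','7','8','9']
def pdStrs : List String := ["1","2","3","4","5","6","7","8","9"]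

-- bit masks of a list of one-char strings / of the digit chars of an int
def pvMaskS (l : List String) : Nat := l.foldl (fun a x => a ||| (1 <<< pvBit x)) 0

def pvMaskC (cs : List Char) : Nat := pvMaskS (cs.map String.singleton)

-- p contributes usefully iff its decimal digits are distinct and all in 1..9
def pvOK (p : Int) : Bool :=
  decide (PySem.Int.toChars p).Nodup && (PySem.Int.toChars p).all (fun c => c ∈ pdDS)

-- the mask-level recursion both programs compute
def pvH : List Int → Nat → Int
  | [], m => if m = 511 then 1 else 0
  | p :: rest, m =>
    if m = 511 then 1
    else
      (if pvOK p && (pvMaskC (PySem.Int.toChars p) &&& m == 0)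
       then pvH rest (m ||| pvMaskC (PySem.Int.toChars p)) else 0) + pvH rest m


-- ---------- generic bit lemmas ----------
theorem pvAndTestBit {a b : Nat} : a &&& b = 0 ↔ ∀ j, ¬(a.testBit j ∧ b.testBit j) := by
  constructor
  · intro h j ⟨h1, h2⟩
    have : (a &&& b).testBit j = true := by simp [Nat.testBit_and, h1, h2]
    simp [h] at this
  · intro h
    apply Nat.eq_of_testBit_eq; intro j
    have := h j
    simp only [Nat.testBit_and, Nat.zero_testBit]
    rcases (Bool.eq_false_or_eq_true (a.testBit j)).symm with h'|h' <;> simp [h'] at this ⊢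
    simp [this]
theorem pvOrEqXor {a b : Nat} (h : a &&& b = 0) : a ||| b = a ^^^ b := by
  apply Nat.eq_of_testBit_eq; intro j
  have := pvAndTestBit.mp h j
  simp only [Nat.testBit_or, Nat.testBit_xor]
  rcases (Bool.eq_false_or_eq_true (a.testBit j)).symm with h'|h' <;> simp [h'] at this ⊢
  simp [this]
theorem pvAnd511 {m : Nat} (h : m < 512) : m &&& 511 = m := by
  have := Nat.and_two_pow_sub_one_eq_mod m 9
  norm_num at this
  omega

-- ---------- masks ----------
theorem pvMaskS_acc (l : List String) (acc : Nat) :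
    l.foldl (fun a x => a ||| (1 <<< pvBit x)) acc = acc ||| pvMaskS l := by
  induction l generalizing acc with
  | nil => simp [pvMaskS]
  | cons x t ih =>
    simp only [pvMaskS, List.foldl_cons] at *
    rw [ih, ih (0 ||| 1 <<< pvBit x)]
    simp [Nat.or_assoc]
theorem pvMaskS_cons (x : String) (l : List String) :
    pvMaskS (x :: l) = (1 <<< pvBit x) ||| pvMaskS l := by
  have := pvMaskS_acc l (0 ||| 1 <<< pvBit x)
  simp only [pvMaskS, List.foldl_cons]
  simpa using this
theorem pvMaskS_testBit (l : List String) (j : Nat) :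
    (pvMaskS l).testBit j = l.any (fun x => pvBit x == j) := by
  induction l with
  | nil => simp [pvMaskS]
  | cons x t ih =>
    rw [pvMaskS_cons]
    simp only [List.any_cons, Nat.testBit_or, Nat.one_shiftLeft, Nat.testBit_two_pow, ih]
    by_cases h : pvBit x = j
    · simp [h]
    · simp [h]
theorem pvMaskS_lt (l : List String) (h : ∀ x ∈ l, pvBit x < 9) : pvMaskS l < 512 := by
  induction l with
  | nil => simp [pvMaskS]
  | cons x t ih =>
    rw [pvMaskS_cons]
    have h1 : (1 <<< pvBit x) < 512 := by
      have hx := h x (by simp)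
      have : (1 : Nat) <<< pvBit x = 2 ^ pvBit x := Nat.one_shiftLeft _
      rw [this]
      calc 2 ^ pvBit x ≤ 2 ^ 8 := Nat.pow_le_pow_right (by norm_num) (by omega)
        _ < 512 := by norm_num
    have h2 : pvMaskS t < 512 := ih (fun y hy => h y (by simp [hy]))
    have : (512 : Nat) = 2 ^ 9 := by norm_num
    rw [this] at h1 h2 ⊢
    exact Nat.or_lt_two_pow h1 h2
theorem pvMaskS_membership (l l' : List String) (h : ∀ x, x ∈ l ↔ x ∈ l') :
    pvMaskS l = pvMaskS l' := by
  apply Nat.eq_of_testBit_eq; intro j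
  rw [pvMaskS_testBit, pvMaskS_testBit, Bool.eq_iff_iff]
  simp only [List.any_eq_true]
  constructor
  · rintro ⟨x, hx, hb⟩; exact ⟨x, (h x).mp hx, hb⟩
  · rintro ⟨x, hx, hb⟩; exact ⟨x, (h x).mpr hx, hb⟩

-- ---------- the nine digits ----------
theorem pvSingleton_inj : Function.Injective String.singleton := by
  intro a b h
  simpa [String.singleton] using h
theorem pdStrs_map : pdStrs = pdDS.map String.singleton := by decide
theorem pvDigSet_eq : pvDigSet = pdStrs := by decide
theorem pvMem_pdStrs {c : Char} : String.singleton c ∈ pdStrs ↔ c ∈ pdDS := by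
  rw [pdStrs_map]
  constructor
  · intro h
    rcases List.mem_map.mp h with ⟨d, hd, he⟩
    rwa [← pvSingleton_inj he]
  · intro h; exact List.mem_map.mpr ⟨c, h, rfl⟩
theorem pvBit_lt_of_mem {x : String} (h : x ∈ pdStrs) : pvBit x < 9 := by
  fin_cases h <;> decide
theorem pvBit_inj_on {x y : String} (hx : x ∈ pdStrs) (hy : y ∈ pdStrs)
    (h : pvBit x = pvBit y) : x = y := by
  fin_cases hx <;> fin_cases hy <;> simp_all <;> revert h <;> decide
theorem pvBit_surj {j : Nat} (h : j < 9) : ∃ d ∈ pdStrs, pvBit d = j := by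
  interval_cases j
  · exact ⟨"1", by decide, by decide⟩
  · exact ⟨"2", by decide, by decide⟩
  · exact ⟨"3", by decide, by decide⟩
  · exact ⟨"4", by decide, by decide⟩
  · exact ⟨"5", by decide, by decide⟩
  · exact ⟨"6", by decide, by decide⟩
  · exact ⟨"7", by decide, by decide⟩
  · exact ⟨"8", by decide, by decide⟩
  · exact ⟨"9", by decide, by decide⟩


-- ---------- set-length facts ----------
theorem pvLen_ofList_eq_iff {α : Type} [BEq α] [LawfulBEq α] (xs : List α) :
    (PySem.Set.ofList xs).length = xs.length ↔ xs.Nodup := by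
  induction xs with
  | nil => simp [PySem.Set.ofList]
  | cons x t ih =>
    rw [PySem.Set.ofList_cons]
    by_cases hx : x ∈ t
    · have hx' : x ∈ PySem.Set.ofList t := (PySem.Set.mem_ofList t x).mpr hx
      have hlt : ((PySem.Set.ofList t).discard x).length < (PySem.Set.ofList t).length := by
        unfold PySem.Set.discard
        apply Nat.lt_of_le_of_ne (List.length_filter_le _ _)
        intro he
        have heq := List.Sublist.eq_of_length (List.filter_sublist) he
        have := (List.filter_eq_self.mp heq) x hx'
        simp at this
      have hle := PySem.Set.length_ofList_le t
      simp only [List.length_cons, List.nodup_cons]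
      constructor
      · intro h; omega
      · intro h; exact absurd hx h.1
    · have : (PySem.Set.ofList t).discard x = PySem.Set.ofList t := by
        unfold PySem.Set.discard
        apply List.filter_eq_self.mpr
        intro y hy
        have : y ∈ t := (PySem.Set.mem_ofList t y).mp hy
        simp; intro he; exact hx (he ▸ this)
      rw [this]
      simp only [List.length_cons, List.nodup_cons, Nat.add_right_cancel_iff, ih]
      tauto

-- ---------- characterisation of is_unique ----------
theorem pvIsUnique_iff (p : Int) (ns : PySem.Set String) (hnd : ns.Nodup) :
    pvIsUnique p ns = true ↔
      ((PySem.Int.toChars p).map String.singleton).Nodup ∧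
        ∀ y ∈ ns, y ∉ (PySem.Int.toChars p).map String.singleton := by
  simp only [pvIsUnique]
  set cs := PySem.Int.toChars p with hcs
  set strs := cs.map String.singleton with hstrs
  have hunion : PySem.Set.union (PySem.Set.ofList strs) ns
      = PySem.Set.ofList strs ++ ns.filter (fun y => !(PySem.Set.ofList strs).contains y) := by
    show PySem.Set.update _ _ = _
    rw [PySem.Set.update_eq_append_filter, PySem.Set.ofList_eq_self_of_nodup ns hnd]
  have hsplit := List.length_eq_length_filter_add (l := ns) (fun y => (PySem.Set.ofList strs).contains y)
  have hle : (PySem.Set.ofList strs).length ≤ strs.length := PySem.Set.length_ofList_le strs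
  have hlen : strs.length = cs.length := by simp [hstrs]
  rw [hunion]
  simp only [PySem.Set.len, List.length_append, gt_iff_lt]
  split
  · rename_i hgt
    simp only [Bool.false_eq_true, false_iff]
    intro ⟨h1, h2⟩
    have ho : (PySem.Set.ofList strs).length = strs.length := (pvLen_ofList_eq_iff strs).mpr h1
    have hf0 : (ns.filter (fun y => (PySem.Set.ofList strs).contains y)).length = 0 := by
      rw [List.length_eq_zero_iff, List.filter_eq_nil_iff]
      intro y hy
      simp only [PySem.Set.contains_eq_listContains, List.contains_iff_mem]
      intro hmem
      exact h2 y hy ((PySem.Set.mem_ofList strs y).mp (by exact_mod_cast hmem))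
    omega
  · rename_i hng
    simp only [true_iff]
    push Not at hng
    have ho : (PySem.Set.ofList strs).length = strs.length := by omega
    have hf0 : (ns.filter (fun y => (PySem.Set.ofList strs).contains y)).length = 0 := by omega
    refine ⟨(pvLen_ofList_eq_iff strs).mp ho, ?_⟩
    intro y hy hmem
    rw [List.length_eq_zero_iff, List.filter_eq_nil_iff] at hf0
    exact hf0 y hy (by
      simp only [PySem.Set.contains_eq_listContains, List.contains_iff_mem]
      exact_mod_cast (PySem.Set.mem_ofList strs y).mpr hmem)

-- ---------- equality with dig_set at mask level ----------
theorem pvEqual_iff_mask (ns : PySem.Set String) (hval : ∀ x ∈ ns, x ∈ pdStrs) :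
    PySem.Set.equal ns pvDigSet = true ↔ pvMaskS ns = 511 := by
  rw [pvDigSet_eq, PySem.Set.equal_iff]
  constructor
  · intro h
    apply Nat.eq_of_testBit_eq; intro j
    rw [pvMaskS_testBit]
    have h511 : (511 : Nat).testBit j = decide (j < 9) := by
      rcases Nat.lt_or_ge j 9 with hj | hj
      · interval_cases j <;> decide
      · have hd : decide (j < 9) = false := by simp; omega
        rw [hd]
        have : (511 : Nat) < 2 ^ j := lt_of_lt_of_le (by norm_num) (Nat.pow_le_pow_right (by norm_num) hj)
        exact Nat.testBit_lt_two_pow this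
    rw [h511, Bool.eq_iff_iff]
    simp only [List.any_eq_true, beq_iff_eq, decide_eq_true_eq]
    constructor
    · rintro ⟨x, hx, hb⟩; rw [← hb]; exact pvBit_lt_of_mem (hval x hx)
    · intro hj
      rcases pvBit_surj hj with ⟨d, hd, hbd⟩
      exact ⟨d, (h d).mpr hd, hbd⟩
  · intro h x
    constructor
    · intro hx; exact hval x hx
    · intro hx
      have hj := pvBit_lt_of_mem hx
      have : (pvMaskS ns).testBit (pvBit x) = true := by
        rw [h]
        interval_cases hb : pvBit x <;> decide
      rw [pvMaskS_testBit] at this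
      simp only [List.any_eq_true, beq_iff_eq] at this
      rcases this with ⟨y, hy, hby⟩
      rwa [pvBit_inj_on (hval y hy) hx hby] at hy

-- ---------- union at mask level ----------
theorem pvMask_union (ns : PySem.Set String) (l : List String) :
    pvMaskS (PySem.Set.union ns (PySem.Set.ofList l)) = pvMaskS ns ||| pvMaskS l := by
  apply Nat.eq_of_testBit_eq; intro j
  rw [pvMaskS_testBit, Nat.testBit_or, pvMaskS_testBit, pvMaskS_testBit, Bool.eq_iff_iff]
  simp only [List.any_eq_true, Bool.or_eq_true]
  constructor
  · rintro ⟨x, hx, hb⟩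
    rcases (PySem.Set.mem_union _ _ x).mp hx with h | h
    · exact Or.inl ⟨x, h, hb⟩
    · exact Or.inr ⟨x, (PySem.Set.mem_ofList l x).mp h, hb⟩
  · rintro (⟨x, hx, hb⟩ | ⟨x, hx, hb⟩)
    · exact ⟨x, (PySem.Set.mem_union _ _ x).mpr (Or.inl hx), hb⟩
    · exact ⟨x, (PySem.Set.mem_union _ _ x).mpr (Or.inr ((PySem.Set.mem_ofList l x).mpr hx)), hb⟩

theorem pvMask_ofList (l : List String) : pvMaskS (PySem.Set.ofList l) = pvMaskS l :=
  pvMaskS_membership _ _ (fun x => PySem.Set.mem_ofList l x)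

-- ---------- the start loop of B ----------
theorem pvStart_invalid (l : List String) (acc : Nat) (h : ∃ x ∈ l, x ∉ pdStrs) :
    pvStart l acc = none := by
  induction l generalizing acc with
  | nil => simp at h
  | cons x t ih =>
    rcases h with ⟨y, hy, hny⟩
    simp only [pvStart, pvDigSet_eq]
    rcases List.mem_cons.mp hy with rfl | hyt
    · rw [if_neg]
      simp only [PySem.Set.contains_eq_listContains, List.contains_iff_mem]
      simpa using hny
    · split
      · exact ih _ ⟨y, hyt, hny⟩
      · rfl
theorem pvStart_valid (l : List String) (acc : Nat) (h : ∀ x ∈ l, x ∈ pdStrs) :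
    pvStart l acc = some (acc ||| pvMaskS l) := by
  induction l generalizing acc with
  | nil => simp [pvStart, pvMaskS]
  | cons x t ih =>
    simp only [pvStart, pvDigSet_eq]
    rw [if_pos, ih _ (fun y hy => h y (List.mem_cons_of_mem _ hy))]
    · rw [pvMaskS_cons, Nat.or_assoc]
    · simp only [PySem.Set.contains_eq_listContains, List.contains_iff_mem]
      exact_mod_cast h x (by simp)


-- ---------- A-side recursion ----------
-- the set A recurses with
def pvU (ns : PySem.Set String) (p : Int) : PySem.Set String :=
  PySem.Set.union ns (PySem.Set.ofList ((PySem.Int.toChars p).map String.singleton))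

theorem pvEnumShift (xs : List Int) (s : Int) :
    PySem.List.enumerate xs (s + 1) = (PySem.List.enumerate xs s).map (fun ip => (ip.1 + 1, ip.2)) := by
  induction xs generalizing s with
  | nil => simp [PySem.List.enumerate_nil]
  | cons x t ih => rw [PySem.List.enumerate_cons, PySem.List.enumerate_cons, List.map_cons, ih]

theorem pvPandA_sum (f : Nat) (ps : List Int) (ns : PySem.Set String)
    (hne : PySem.Set.equal ns pvDigSet = false) :
    pvPandA (f + 1) ps ns =
      ((PySem.List.enumerate ps).map (fun ip =>
        if pvIsUnique ip.2 ns then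
          pvPandA f (PySem.List.slice ps (some (ip.1 + 1))) (pvU ns ip.2) else 0)).sum := by
  show (if PySem.Set.equal ns pvDigSet = true then _ else _) = _
  rw [if_neg (by simp [hne])]
  cases ps with
  | nil => simp [PySem.List.enumerate_nil]
  | cons p rest =>
    rw [if_neg (by simp)]
    rw [PySem.List.foldl_congr_mem _ _
      (fun l ip => l + (if pvIsUnique ip.2 ns then
        pvPandA f (PySem.List.slice (p :: rest) (some (ip.1 + 1))) (pvU ns ip.2) else 0)) 0
      (by intro acc x hx; by_cases h : pvIsUnique x.2 ns = true <;> simp [h, pvU])]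
    rw [PySem.List.foldl_add]
    simp

theorem pvPandA_rec (f : Nat) (p : Int) (rest : List Int) (ns : PySem.Set String)
    (hne : PySem.Set.equal ns pvDigSet = false) :
    pvPandA (f + 1) (p :: rest) ns =
      (if pvIsUnique p ns then pvPandA f rest (pvU ns p) else 0) + pvPandA (f + 1) rest ns := by
  rw [pvPandA_sum f (p :: rest) ns hne, pvPandA_sum f rest ns hne]
  have h0 : PySem.List.enumerate (p :: rest) 0 = (0, p) :: PySem.List.enumerate rest 1 := by
    rw [PySem.List.enumerate_cons]; norm_num
  rw [h0, List.map_cons, List.sum_cons]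
  have hshift : PySem.List.enumerate rest 1 = (PySem.List.enumerate rest).map (fun ip => (ip.1 + 1, ip.2)) := by
    have := pvEnumShift rest 0
    norm_num at this
    exact this
  congr 1
  · norm_num [PySem.List.slice_from_one]
  · rw [hshift, List.map_map]
    apply congrArg
    apply List.map_congr_left
    intro ip hip
    rcases (PySem.List.mem_enumerate_iff rest 0 ip).mp hip with ⟨k, hk, rfl⟩
    simp only [Function.comp]
    congr 1
    rw [PySem.List.slice_from _ (by positivity), PySem.List.slice_from _ (by positivity)]
    rw [show ((0 : Int) + (k : Int) + 1 + 1).toNat = ((0 : Int) + (k : Int) + 1).toNat + 1 from by omega,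
      List.drop_succ_cons]

theorem pvPandA_invalid (ps : List Int) (f : Nat) (ns : PySem.Set String)
    (hbad : ∃ x ∈ ns, x ∉ pdStrs) : pvPandA f ps ns = 0 := by
  induction ps generalizing f ns with
  | nil =>
    cases f with
    | zero => rfl
    | succ f =>
      rcases hbad with ⟨x, hx, hnx⟩
      have hne : PySem.Set.equal ns pvDigSet = false := by
        rw [← Bool.not_eq_true, pvDigSet_eq, PySem.Set.equal_iff]
        intro h
        exact hnx ((h x).mp hx)
      show (if PySem.Set.equal ns pvDigSet = true then _ else _) = _
      rw [if_neg (by simp [hne]), if_pos rfl]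
  | cons p rest ih =>
    cases f with
    | zero => rfl
    | succ f =>
      rcases hbad with ⟨x, hx, hnx⟩
      have hne : PySem.Set.equal ns pvDigSet = false := by
        rw [← Bool.not_eq_true, pvDigSet_eq, PySem.Set.equal_iff]
        intro h
        exact hnx ((h x).mp hx)
      rw [pvPandA_rec f p rest ns hne]
      have h1 : pvPandA f rest (pvU ns p) = 0 := by
        apply ih
        exact ⟨x, (PySem.Set.mem_union _ _ x).mpr (Or.inl hx), hnx⟩
      have h2 : pvPandA (f + 1) rest ns = 0 := ih (f + 1) ns ⟨x, hx, hnx⟩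
      rw [h1, h2]
      split <;> simp

-- ---------- pvH helpers ----------
theorem pvH_full (ps : List Int) : pvH ps 511 = 1 := by cases ps <;> simp [pvH]

theorem pvOK_iff (p : Int) :
    pvOK p = true ↔ (PySem.Int.toChars p).Nodup ∧ ∀ c ∈ PySem.Int.toChars p, c ∈ pdDS := by
  simp [pvOK, List.all_eq_true]

theorem pvStrsNodup_iff (cs : List Char) :
    (cs.map String.singleton).Nodup ↔ cs.Nodup := List.nodup_map_iff pvSingleton_inj

theorem pvDisj_iff (ns : PySem.Set String) (cs : List Char)
    (hval : ∀ x ∈ ns, x ∈ pdStrs) (hcs : ∀ c ∈ cs, c ∈ pdDS) :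
    (∀ y ∈ ns, y ∉ cs.map String.singleton) ↔ pvMaskS ns &&& pvMaskC cs = 0 := by
  rw [pvMaskC, pvAndTestBit]
  constructor
  · intro h j ⟨h1, h2⟩
    rw [pvMaskS_testBit] at h1 h2
    simp only [List.any_eq_true, beq_iff_eq] at h1 h2
    rcases h1 with ⟨x, hx, hbx⟩
    rcases h2 with ⟨y, hy, hby⟩
    have hyv : y ∈ pdStrs := by
      rcases List.mem_map.mp hy with ⟨c, hc, rfl⟩
      exact pvMem_pdStrs.mpr (hcs c hc)
    have : x = y := pvBit_inj_on (hval x hx) hyv (hbx.trans hby.symm)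
    exact h x hx (this ▸ hy)
  · intro h y hy hymem
    apply h (pvBit y)
    constructor
    · rw [pvMaskS_testBit]
      simp only [List.any_eq_true, beq_iff_eq]
      exact ⟨y, hy, rfl⟩
    · rw [pvMaskS_testBit]
      simp only [List.any_eq_true, beq_iff_eq]
      exact ⟨y, hymem, rfl⟩

theorem pvPandA_valid (ps : List Int) (f : Nat) (ns : PySem.Set String)
    (hf : ps.length < f) (hnd : ns.Nodup) (hval : ∀ x ∈ ns, x ∈ pdStrs) :
    pvPandA f ps ns = pvH ps (pvMaskS ns) := by
  induction ps generalizing f ns with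
  | nil =>
    cases f with
    | zero => omega
    | succ f =>
      rcases (Bool.eq_false_or_eq_true (PySem.Set.equal ns pvDigSet)).symm with he | he
      · have hm : pvMaskS ns ≠ 511 := fun hmm => by
          rw [(pvEqual_iff_mask ns hval).mpr hmm] at he
          exact absurd he (by decide)
        simp [pvPandA, pvH, he, hm]
      · have hm := (pvEqual_iff_mask ns hval).mp he
        simp [pvPandA, pvH, he, hm]
  | cons p rest ih =>
    cases f with
    | zero => omega
    | succ f =>
      rcases (Bool.eq_false_or_eq_true (PySem.Set.equal ns pvDigSet)).symm with he | he
      · -- not yet pandigital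
        have hm : pvMaskS ns ≠ 511 := fun hmm => by
          rw [(pvEqual_iff_mask ns hval).mpr hmm] at he
          exact absurd he (by decide)
        rw [pvPandA_rec f p rest ns he, pvH, if_neg hm]
        have htail : pvPandA (f + 1) rest ns = pvH rest (pvMaskS ns) := by
          exact ih (f + 1) ns (by simp only [List.length_cons] at hf; omega) hnd hval
        rw [htail]
        congr 1
        -- the head branch
        set cs := PySem.Int.toChars p with hcs
        rcases (Bool.eq_false_or_eq_true (pvOK p)).symm with hok | hok
        · -- p cannot contribute
          rcases (Bool.eq_false_or_eq_true (pvIsUnique p ns)).symm with hu | hu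
          · rw [hu, hok]; simp
          · rw [if_pos hu, hok]
            simp only [Bool.false_and]
            rw [if_neg (by decide)]
            rcases (pvIsUnique_iff p ns hnd).mp hu with ⟨hstr, hdisj⟩
            have hcsnd : cs.Nodup := (pvStrsNodup_iff cs).mp hstr
            have : ¬ ∀ c ∈ cs, c ∈ pdDS := by
              intro hall
              rw [← Bool.not_eq_true, pvOK_iff] at hok
              exact hok ⟨hcsnd, hall⟩
            push Not at this
            rcases this with ⟨c, hc, hcn⟩
            apply pvPandA_invalid
            refine ⟨String.singleton c, ?_, fun hmem => hcn (pvMem_pdStrs.mp hmem)⟩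
            exact (PySem.Set.mem_union _ _ _).mpr
              (Or.inr ((PySem.Set.mem_ofList _ _).mpr (List.mem_map.mpr ⟨c, hc, rfl⟩)))
        · -- p has distinct 1-9 digits
          rcases (pvOK_iff p).mp hok with ⟨hcsnd, hall⟩
          have hstr : (cs.map String.singleton).Nodup := (pvStrsNodup_iff cs).mpr hcsnd
          rcases (Bool.eq_false_or_eq_true (pvMaskC cs &&& pvMaskS ns == 0)).symm with hd | hd
          · -- overlapping digits: neither side contributes
            have hnd0 : ¬ (∀ y ∈ ns, y ∉ cs.map String.singleton) := by
              intro hdisj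
              rw [(pvDisj_iff ns cs hval hall)] at hdisj
              rw [Nat.and_comm] at hdisj
              simp [hdisj] at hd
            have hu : pvIsUnique p ns = false := by
              rw [← Bool.not_eq_true, pvIsUnique_iff p ns hnd]
              intro ⟨_, h2⟩; exact hnd0 h2
            rw [hu, hd]; simp
          · -- disjoint digits: both recurse
            have hdisj0 : pvMaskC cs &&& pvMaskS ns = 0 := by simpa using hd
            have hdisj : ∀ y ∈ ns, y ∉ cs.map String.singleton :=
              (pvDisj_iff ns cs hval hall).mpr (by rw [Nat.and_comm]; exact hdisj0)
            have hu : pvIsUnique p ns = true := (pvIsUnique_iff p ns hnd).mpr ⟨hstr, hdisj⟩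
            rw [if_pos hu, if_pos (by simp [hok, hdisj0])]
            have hrec : pvPandA f rest (pvU ns p) = pvH rest (pvMaskS (pvU ns p)) := by
              apply ih
              · simp at hf; omega
              · exact PySem.Set.nodup_union _ _ hnd
              · intro x hx
                rcases (PySem.Set.mem_union _ _ x).mp hx with h | h
                · exact hval x h
                · rcases List.mem_map.mp ((PySem.Set.mem_ofList _ _).mp h) with ⟨c, hc, rfl⟩
                  exact pvMem_pdStrs.mpr (hall c hc)
            rw [hrec, pvU, pvMask_union]
            rfl
      · -- already pandigital
        have hm : pvMaskS ns = 511 := (pvEqual_iff_mask ns hval).mp he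
        simp only [pvPandA]
        rw [if_pos he, hm, pvH_full]

-- ---------- B-side: the DP invariant ----------
theorem pvToChars_ne_nil (n : Int) : PySem.Int.toChars n ≠ [] := by
  have hcore : ∀ (fuel m : Nat) (acc : List Char), acc ≠ [] → Nat.toDigitsCore 10 fuel m acc ≠ [] := by
    intro fuel
    induction fuel with
    | zero => intro m acc h; simp [Nat.toDigitsCore]; exact h
    | succ f ih =>
      intro m acc h
      simp only [Nat.toDigitsCore]
      split
      · simp
      · exact ih _ _ (by simp)
  have hd : ∀ m : Nat, Nat.toDigits 10 m ≠ [] := by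
    intro m
    show Nat.toDigitsCore 10 (m + 1) m [] ≠ []
    simp only [Nat.toDigitsCore]
    split
    · simp
    · exact hcore _ _ _ (by simp)
  unfold PySem.Int.toChars
  split
  · simp
  · exact hd _

theorem pvMaskC_lt (cs : List Char) (h : ∀ c ∈ cs, c ∈ pdDS) : pvMaskC cs < 512 := by
  apply pvMaskS_lt
  intro x hx
  rcases List.mem_map.mp hx with ⟨c, hc, rfl⟩
  exact pvBit_lt_of_mem (pvMem_pdStrs.mpr (h c hc))

theorem pvMaskC_ne_zero (cs : List Char) (h : cs ≠ []) : pvMaskC cs ≠ 0 := by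
  cases cs with
  | nil => exact absurd rfl h
  | cons c t =>
    intro h0
    have : (pvMaskC (c :: t)).testBit (pvBit (String.singleton c)) = true := by
      rw [pvMaskC, List.map_cons, pvMaskS_cons, Nat.testBit_or, Nat.one_shiftLeft,
        Nat.testBit_two_pow_self]
      simp
    rw [h0, Nat.zero_testBit] at this
    exact Bool.false_ne_true this

theorem pvH_cons_ok (p : Int) (rest : List Int) (k : Nat) (hok : pvOK p = true)
    (hk : k < 512) :
    pvH (p :: rest) k =
      (if pvMaskC (PySem.Int.toChars p) &&& k = 0
       then pvH rest (k ||| pvMaskC (PySem.Int.toChars p)) else 0) + pvH rest k := by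
  have hall : ∀ c ∈ PySem.Int.toChars p, c ∈ pdDS := ((pvOK_iff p).mp hok).2
  have hlt := pvMaskC_lt _ hall
  have hne0 := pvMaskC_ne_zero _ (pvToChars_ne_nil p)
  by_cases h511 : k = 511
  · subst h511
    rw [pvH_full, pvH_full]
    rw [if_neg (by rw [pvAnd511 hlt]; exact hne0)]
    norm_num
  · show (if k = 511 then _ else _) = _
    rw [if_neg h511]
    congr 1
    by_cases h0 : pvMaskC (PySem.Int.toChars p) &&& k = 0
    · rw [if_pos h0, if_pos (by simp [hok, h0])]
    · rw [if_neg h0, if_neg (by simp [hok, h0])]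

theorem pvH_cons_skip (p : Int) (rest : List Int) (k : Nat) (hok : pvOK p = false) :
    pvH (p :: rest) k = pvH rest k := by
  by_cases h511 : k = 511
  · subst h511; rw [pvH_full, pvH_full]
  · show (if k = 511 then _ else _) = _
    rw [if_neg h511, if_neg (by simp [hok])]
    norm_num

def pvS (v : List Int) (ps : List Int) : Int := ∑ k ∈ Finset.range 512, v[k]! * pvH ps k

theorem pvS_nil (v : List Int) : pvS v [] = v[511]! := by
  unfold pvS
  have : ∀ k, v[k]! * pvH [] k = if k = 511 then v[k]! else 0 := by
    intro k
    show v[k]! * (if k = 511 then (1 : Int) else 0) = _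
    split <;> simp
  rw [Finset.sum_congr rfl (fun k _ => this k), Finset.sum_ite_eq']
  simp

theorem pvS_skip (v : List Int) (p : Int) (rest : List Int) (hok : pvOK p = false) :
    pvS v (p :: rest) = pvS v rest := by
  unfold pvS
  exact Finset.sum_congr rfl (fun k _ => by rw [pvH_cons_skip p rest k hok])

theorem pvStep_len (v : List Int) (m : Nat) : (pvStep v m).length = 512 := by
  simp [pvStep]

theorem pvStep_get (v : List Int) (m k : Nat) (hk : k < 512) :
    (pvStep v m)[k]! = v[k]! + (if k &&& m == m then v[k ^^^ m]! else 0) := by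
  have hlen : (pvStep v m).length = 512 := pvStep_len v m
  rw [getElem!_pos _ _ (by omega)]
  unfold pvStep
  simp [List.getElem_map]

set_option maxRecDepth 4096 in
theorem pvS_step (v : List Int) (p : Int) (rest : List Int) (hok : pvOK p = true) :
    pvS (pvStep v (pvMaskC (PySem.Int.toChars p))) rest = pvS v (p :: rest) := by
  set m := pvMaskC (PySem.Int.toChars p) with hm
  have hall : ∀ c ∈ PySem.Int.toChars p, c ∈ pdDS := ((pvOK_iff p).mp hok).2
  have hlt : m < 512 := pvMaskC_lt _ hall
  unfold pvS
  have hL : ∀ k ∈ Finset.range 512,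
      (pvStep v m)[k]! * pvH rest k
        = v[k]! * pvH rest k + (if k &&& m == m then v[k ^^^ m]! * pvH rest k else 0) := by
    intro k hk
    rw [pvStep_get v m k (Finset.mem_range.mp hk)]
    ring_nf
    split <;> ring
  rw [Finset.sum_congr rfl hL, Finset.sum_add_distrib]
  have hR : ∀ k ∈ Finset.range 512,
      v[k]! * pvH (p :: rest) k
        = v[k]! * pvH rest k + (if m &&& k = 0 then v[k]! * pvH rest (k ||| m) else 0) := by
    intro k hk
    rw [pvH_cons_ok p rest k hok (Finset.mem_range.mp hk), ← hm]
    split <;> ring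
  rw [Finset.sum_congr rfl hR, Finset.sum_add_distrib]
  congr 1
  -- reindex k ↦ k ^^^ m
  apply Finset.sum_nbij' (fun k => k ^^^ m) (fun k => k ^^^ m)
  · intro a ha
    rw [Finset.mem_range] at *
    have : (512 : Nat) = 2 ^ 9 := by norm_num
    rw [this] at *
    exact Nat.xor_lt_two_pow ha (by omega)
  · intro a ha
    rw [Finset.mem_range] at *
    have : (512 : Nat) = 2 ^ 9 := by norm_num
    rw [this] at *
    exact Nat.xor_lt_two_pow ha (by omega)
  · intro a _; exact Nat.xor_cancel_right m a
  · intro a _; exact Nat.xor_cancel_right m a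
  · intro k _
    by_cases hkm : k &&& m = m
    · have h1 : (k ^^^ m) &&& m = 0 := by
        rw [Nat.and_xor_distrib_right, hkm, Nat.and_self, Nat.xor_self]
      have h2 : m &&& (k ^^^ m) = 0 := by rw [Nat.and_comm]; exact h1
      have h3 : (k ^^^ m) ||| m = k := by
        rw [pvOrEqXor h1, Nat.xor_cancel_right]
      rw [if_pos (by simp [hkm]), if_pos h2, h3]
    · have h2 : m &&& (k ^^^ m) ≠ 0 := by
        rw [Nat.and_comm, Nat.and_xor_distrib_right, Nat.and_self]
        intro h
        exact hkm (by
          have := Nat.xor_eq_zero_iff.mp h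
          exact this)
      rw [if_neg (by simp [hkm]), if_neg h2]

theorem pvFold (ps : List Int) (v : List Int) (hv : v.length = 512) :
    (ps.foldl (fun dp p =>
        let s := PySem.Int.toChars p
        let strs := s.map String.singleton
        if PySem.Set.len (PySem.Set.ofList strs) < strs.length
           || !PySem.Set.issubset (PySem.Set.ofList strs) pvDigSet then dp
        else pvStep dp (s.foldl (fun m c => m ||| (1 <<< pvBit (String.singleton c))) 0)) v)[511]!
      = pvS v ps := by
  induction ps generalizing v with
  | nil => rw [List.foldl_nil, pvS_nil]
  | cons p rest ih =>
    rw [List.foldl_cons]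
    have hstep : (let s := PySem.Int.toChars p
        let strs := s.map String.singleton
        if PySem.Set.len (PySem.Set.ofList strs) < strs.length
           || !PySem.Set.issubset (PySem.Set.ofList strs) pvDigSet then v
        else pvStep v (s.foldl (fun m c => m ||| (1 <<< pvBit (String.singleton c))) 0))
        = if pvOK p = true then pvStep v (pvMaskC (PySem.Int.toChars p)) else v := by
      dsimp only
      have hmfold : (PySem.Int.toChars p).foldl
          (fun m c => m ||| (1 <<< pvBit (String.singleton c))) 0
            = pvMaskC (PySem.Int.toChars p) := by
        rw [pvMaskC, pvMaskS, List.foldl_map]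
      split
      · rename_i hc
        rw [if_neg]
        intro hok
        rcases (pvOK_iff p).mp hok with ⟨hnd, hall⟩
        simp only [Bool.or_eq_true, decide_eq_true_eq] at hc
        rcases hc with hc | hc
        · have heq : (PySem.Set.ofList ((PySem.Int.toChars p).map String.singleton)).length
              = ((PySem.Int.toChars p).map String.singleton).length :=
            (pvLen_ofList_eq_iff _).mpr ((pvStrsNodup_iff _).mpr hnd)
          simp only [PySem.Set.len] at hc
          omega
        · have hsub : PySem.Set.issubset
              (PySem.Set.ofList ((PySem.Int.toChars p).map String.singleton)) pvDigSet = true := by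
            apply (PySem.Set.issubset_iff _ _).mpr
            intro x hx
            rcases List.mem_map.mp ((PySem.Set.mem_ofList _ _).mp hx) with ⟨c, hcmem, rfl⟩
            rw [pvDigSet_eq]
            exact pvMem_pdStrs.mpr (hall c hcmem)
          rw [hsub] at hc
          simp at hc
      · rename_i hc
        rw [hmfold, if_pos]
        simp only [Bool.or_eq_true, decide_eq_true_eq, not_or] at hc
        rcases hc with ⟨hc1, hc2⟩
        apply (pvOK_iff p).mpr
        constructor
        · apply (pvStrsNodup_iff _).mp
          apply (pvLen_ofList_eq_iff _).mp
          have hle := PySem.Set.length_ofList_le ((PySem.Int.toChars p).map String.singleton)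
          simp only [PySem.Set.len, not_lt] at hc1
          omega
        · intro c hcm
          have hx : String.singleton c ∈ PySem.Set.ofList ((PySem.Int.toChars p).map String.singleton) :=
            (PySem.Set.mem_ofList _ _).mpr (List.mem_map.mpr ⟨c, hcm, rfl⟩)
          have := (PySem.Set.issubset_iff _ _).mp (by simpa using hc2) _ hx
          rw [pvDigSet_eq] at this
          exact pvMem_pdStrs.mp this
    rw [hstep]
    rcases (Bool.eq_false_or_eq_true (pvOK p)).symm with hok | hok
    · rw [if_neg (by simp [hok]), ih v hv, pvS_skip v p rest hok]
    · rw [if_pos hok, ih _ (pvStep_len v _), pvS_step v p rest hok]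

-- ===== VERDICT (by name: the statement is the Claim_ definition above) =====
theorem Pandigital_prime_sets1_spec : Claim_equal_Pandigital_prime_sets1 := by
  intro prime num_set _
  unfold Spec_Pandigital_prime_sets1 Pandigital_prime_sets1 Pandigital_prime_sets1_alt
  by_cases hval : ∀ x ∈ num_set, x ∈ pdStrs
  · -- every member of num_set is one of "1".."9"
    have hvs : ∀ x ∈ PySem.Set.ofList num_set, x ∈ pdStrs :=
      fun x hx => hval x ((PySem.Set.mem_ofList _ _).mp hx)
    have hstart : pvStart num_set 0 = some (pvMaskS num_set) := by
      rw [pvStart_valid num_set 0 hval, Nat.zero_or]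
    rw [hstart]
    rw [pvPandA_valid prime (prime.length + 1) _ (by omega)
      (PySem.Set.nodup_ofList num_set) hvs, pvMask_ofList]
    set start := pvMaskS num_set with hst
    have hslt : start < 512 := pvMaskS_lt _ (fun x hx => pvBit_lt_of_mem (hval x hx))
    have hdp0len : ((List.replicate 512 (0 : Int)).set start 1).length = 512 := by
      rw [List.length_set, List.length_replicate]
    show pvH prime start = _
    dsimp only
    rw [pvFold prime _ hdp0len]
    unfold pvS
    have hterm : ∀ k ∈ Finset.range 512,
        ((List.replicate 512 (0 : Int)).set start 1)[k]! * pvH prime k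
          = if k = start then pvH prime k else 0 := by
      intro k hk
      have hklt : k < 512 := Finset.mem_range.mp hk
      rw [getElem!_pos _ _ (by rw [List.length_set, List.length_replicate]; exact hklt), List.getElem_set]
      by_cases hks : start = k
      · rw [if_pos hks, if_pos hks.symm, one_mul]
      · rw [if_neg hks, if_neg (fun h => hks h.symm), List.getElem_replicate, zero_mul]
    rw [Finset.sum_congr rfl hterm, Finset.sum_ite_eq']
    rw [if_pos (Finset.mem_range.mpr hslt)]
  · -- some member is not a digit 1..9: both sides are 0
    push Not at hval
    rcases hval with ⟨x, hx, hnx⟩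
    rw [pvStart_invalid num_set 0 ⟨x, hx, hnx⟩]
    exact pvPandA_invalid prime _ _ ⟨x, (PySem.Set.mem_ofList _ _).mpr hx, hnx⟩
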